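-- pv_equiv track=rewrite | github.com/abjtngi/ScalerAssignments | src/magicianAndChocolates.py | nchoc
-- ===== SOURCE A (Python) =====
-- from heapq import heapify, heappop, heappush
--
-- def nchoc(A, B):
-- 	maxChocolatesEaten = 0
-- 	p = pow(10,9) + 7
-- 	if len(B) == 0:
-- 		return 0
-- 	B = [-x for x in B]
-- 	heapify(B)
-- 	for _ in range(A):
-- 		if len(B) == 0:
-- 			break
-- 		chocolatesInMaxBag = -1 * heappop(B)
-- 		maxChocolatesEaten += (chocolatesInMaxBag % p)
-- 		replacementChocolates = chocolatesInMaxBag // 2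
-- 		heappush(B, -replacementChocolates)
--
-- 	return maxChocolatesEaten%p
-- ===== SOURCE B (Python) =====
-- from heapq import nlargest
--
-- def nchoc(A, B):
--     p = 10**9 + 7
--     vals = []
--     for x in B:
--         while x > 0:
--             vals.append(x)
--             x //= 2
--     if A >= len(vals):
--         return sum(vals) % p
--     return sum(nlargest(A, vals)) % p
-- ===== Notes on version B (the rewrite author's own statement) =====
-- stated objective: alternative
-- what changed: A simulates eating pick by pick with a heap of all bags (one pop+push per pick); B uses the closed-form greedy characterisation instead: expand each bag into its halving chain v, v//2, ... down to 1 and sum the A largest chain values with heapq.nlargest, mod p. Pre_ excludes only nonempty all-negative B with A >= 1: negative bag sizes are outside the task's domain (chocolate counts), and there A's floor-halving drifts each negative maximum toward -1 pick by pick while B eats nothing; whenever any element is nonnegative A never touches the negatives and the two agree.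
-- outside the precondition, e.g. on nchoc(2, [-4, -4]): A returns 1000000001, B returns 0; on nchoc(1, [-3]): A returns 1000000004, B returns 0
import Mathlib
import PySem

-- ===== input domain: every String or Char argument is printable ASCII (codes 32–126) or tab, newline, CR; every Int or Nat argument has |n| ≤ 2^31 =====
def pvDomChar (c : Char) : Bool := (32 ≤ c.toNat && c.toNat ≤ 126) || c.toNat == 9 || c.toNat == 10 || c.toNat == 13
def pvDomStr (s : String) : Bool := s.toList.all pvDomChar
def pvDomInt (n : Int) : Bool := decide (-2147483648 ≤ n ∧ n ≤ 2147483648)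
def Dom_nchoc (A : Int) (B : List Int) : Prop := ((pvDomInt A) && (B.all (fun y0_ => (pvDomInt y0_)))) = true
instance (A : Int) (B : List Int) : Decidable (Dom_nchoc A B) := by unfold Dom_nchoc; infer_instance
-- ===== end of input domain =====

-- B replaces A's pick-by-pick heap simulation by the greedy closed form: expand each
-- bag into its halving chain and sum the A largest chain values, mod p.

-- ===== PORT A =====
def nchocP : Int := 10 ^ 9 + 7

-- heapq on a list of ints is ported through the heap's observable contract, which is
-- exact here: heapify arranges the list into a heap, heappop removes and returns the
-- minimum element, heappush adds an element; the loop reads only the popped values,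
-- which depend only on the multiset of heap elements.
def nchocLoopA : Nat → List Int → Int → Int
  | 0, _, acc => acc
  | Nat.succ n, heap, acc =>
    if heap.length = 0 then acc
    else
      match heap.min? with
      | none => acc   -- unreachable: heap ≠ []
      | some m =>
        let chocolatesInMaxBag := -1 * m
        let acc' := acc + PySem.Int.mod chocolatesInMaxBag nchocP
        let replacementChocolates := PySem.Int.floordiv chocolatesInMaxBag 2
        nchocLoopA n (heap.erase m ++ [-replacementChocolates]) acc'

def nchoc (A : Int) (B : List Int) : Int :=
  if PySem.List.len B = 0 then 0
  else PySem.Int.mod (nchocLoopA A.toNat (B.map (fun x => -x)) 0) nchocP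

-- ===== PORT B =====
-- the inner 'while x > 0: append x; x //= 2' loop of Source B
def nchocChain (x : Int) : List Int :=
  if _h : 0 < x then
    x :: nchocChain (PySem.Int.floordiv x 2)
  else []
termination_by x.toNat
decreasing_by
  have h1 : PySem.Int.floordiv x 2 < x := (PySem.Int.floordiv_lt_iff_lt_mul (by norm_num)).mpr (by omega)
  omega

-- heapq.nlargest(A, vals) = the A largest elements, descending = sorted(vals, reverse=True)[:A]
def nchoc_alt (A : Int) (B : List Int) : Int :=
  let vals := B.foldl (fun acc x => acc ++ nchocChain x) []
  if (vals.length : Int) ≤ A then PySem.Int.mod vals.sum nchocP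
  else PySem.Int.mod ((PySem.List.sorted vals (fun v => v) true).take A.toNat).sum nchocP

-- ===== PRECONDITION & SPEC =====
-- Pre_ excludes only nonempty all-negative B with A ≥ 1 (negative bag sizes, outside the
-- chocolate domain, where A's floor-halving drifts each negative maximum toward -1 pick by
-- pick while B eats nothing); with any nonnegative element present A never touches the
-- negatives (zeros halve to zeros and stay maximal) and the two agree.
def Pre_nchoc (A : Int) (B : List Int) : Prop := B = [] ∨ (∃ x ∈ B, 0 ≤ x) ∨ A ≤ 0
instance (A : Int) (B : List Int) : Decidable (Pre_nchoc A B) := by unfold Pre_nchoc; infer_instance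

def pvWitness_nchoc : Int × List Int := (3, [4, 6, 1])

def Spec_nchoc (A : Int) (B : List Int) (out : Int) : Prop := out = nchoc_alt A B
instance (A : Int) (B : List Int) (out : Int) : Decidable (Spec_nchoc A B out) := by unfold Spec_nchoc; infer_instance

-- ===== CLAIM (what is proved, stated in full; the proofs are below) =====
def Claim_equal_nchoc : Prop := ∀ (A : Int) (B : List Int), Dom_nchoc A B → Pre_nchoc A B → Spec_nchoc A B (nchoc A B)

-- ===== LEMMAS AND PROOFS =====

-- the multiset of values A's greedy can still eat: chains of the (negated) heap entries
def nchocE (h : List Int) : List Int := (h.map (fun t => nchocChain (-t))).flatten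

-- spec-side greedy: sum of (v % p) over the n largest elements, by repeated max-extraction
def nchocTop : Nat → List Int → Int
  | 0, _ => 0
  | Nat.succ n, l =>
    match l.max? with
    | none => 0
    | some m => PySem.Int.mod m nchocP + nchocTop n (l.erase m)

theorem nchocChain_of_pos {x : Int} (h : 0 < x) :
    nchocChain x = x :: nchocChain (PySem.Int.floordiv x 2) := by
  rw [nchocChain]; simp [h]

theorem nchocChain_of_nonpos {x : Int} (h : ¬ 0 < x) : nchocChain x = [] := by
  rw [nchocChain]; simp [h]

theorem nchocChain_mem {x y : Int} (h : y ∈ nchocChain x) : 0 < y ∧ y ≤ x := by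
  fun_induction nchocChain x with
  | case1 x hx ih =>
    rcases List.mem_cons.mp h with rfl | hmem
    · exact ⟨hx, le_refl _⟩
    · have h2 : PySem.Int.floordiv x 2 < x :=
        (PySem.Int.floordiv_lt_iff_lt_mul (by norm_num)).mpr (by omega)
      have := ih hmem
      omega
  | case2 x hx => simp at h

theorem min?_of_perm (h h' : List Int) (hp : h.Perm h') : h.min? = h'.min? := by
  cases hm : h.min? with
  | none =>
    rw [List.min?_eq_none_iff] at hm
    subst hm
    rw [hp.symm.eq_nil]
    rfl
  | some m =>
    rw [List.min?_eq_some_iff] at hm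
    symm
    rw [List.min?_eq_some_iff]
    exact ⟨hp.mem_iff.mp hm.1, fun b hb => hm.2 b (hp.mem_iff.mpr hb)⟩

theorem max?_of_perm (h h' : List Int) (hp : h.Perm h') : h.max? = h'.max? := by
  cases hm : h.max? with
  | none =>
    rw [List.max?_eq_none_iff] at hm
    subst hm
    rw [hp.symm.eq_nil]
    rfl
  | some m =>
    rw [List.max?_eq_some_iff] at hm
    symm
    rw [List.max?_eq_some_iff]
    exact ⟨hp.mem_iff.mp hm.1, fun b hb => hm.2 b (hp.mem_iff.mpr hb)⟩

theorem nchocTop_perm (n : Nat) : ∀ (l l' : List Int), l.Perm l' → nchocTop n l = nchocTop n l' := by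
  induction n with
  | zero => intro l l' _; rfl
  | succ n ih =>
    intro l l' hp
    rw [nchocTop, nchocTop, max?_of_perm l l' hp]
    cases hm : l'.max? with
    | none => rfl
    | some m =>
      show PySem.Int.mod m nchocP + nchocTop n (l.erase m)
        = PySem.Int.mod m nchocP + nchocTop n (l'.erase m)
      rw [ih _ _ (hp.erase m)]

-- extract the maximum through any permutation decomposition
theorem nchocTop_cons (n : Nat) (l l' : List Int) (m : Int) (hp : l.Perm (m :: l'))
    (hub : ∀ y ∈ l, y ≤ m) :
    nchocTop (n + 1) l = PySem.Int.mod m nchocP + nchocTop n l' := by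
  have hmem : m ∈ l := hp.mem_iff.mpr (List.mem_cons_self)
  have hmax : l.max? = some m := List.max?_eq_some_iff.mpr ⟨hmem, hub⟩
  rw [nchocTop, hmax]
  have he : (l.erase m).Perm l' := by
    have := hp.erase m
    simpa using this
  show PySem.Int.mod m nchocP + nchocTop n (l.erase m) = _
  rw [nchocTop_perm n _ _ he]

theorem aLoopA_minzero (n : Nat) (h : List Int) (acc : Int) (hmin : h.min? = some 0) :
    nchocLoopA n h acc = acc := by
  induction n generalizing h acc with
  | zero => simp [nchocLoopA]
  | succ n ih =>
    have hmem : (0 : Int) ∈ h := (List.min?_eq_some_iff.mp hmin).1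
    have hlen : ¬ h.length = 0 := by
      simp [List.length_eq_zero_iff]
      exact List.ne_nil_of_mem hmem
    rw [nchocLoopA]
    simp only [hlen, if_false, hmin]
    have h1 : PySem.Int.mod (-1 * 0) nchocP = 0 := by decide
    have h2 : -(PySem.Int.floordiv (-1 * 0) 2) = (0 : Int) := by decide
    rw [h1, h2, add_zero]
    have hperm : (h.erase 0 ++ [(0 : Int)]).Perm h :=
      (List.perm_append_singleton _ _).trans (List.perm_cons_erase hmem).symm
    rw [ih _ _ (by rw [min?_of_perm _ _ hperm, hmin])]

-- E-multiset of the heap after one A-step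
theorem nchocE_step (h : List Int) (m : Int) (hm : m ∈ h) :
    (nchocE h).Perm (nchocChain (-m) ++ nchocE (h.erase m)) := by
  have hp : h.Perm (m :: h.erase m) := List.perm_cons_erase hm
  have : (nchocE h).Perm (nchocE (m :: h.erase m)) := by
    unfold nchocE
    exact (hp.map _).flatten
  simpa [nchocE] using this

theorem nchocE_append (h : List Int) (w : Int) :
    nchocE (h ++ [w]) = nchocE h ++ nchocChain (-w) := by
  simp [nchocE]

theorem nchocE_ub (h : List Int) (m : Int) (hmin : h.min? = some m) :
    ∀ y ∈ nchocE h, y ≤ -m := by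
  intro y hy
  obtain ⟨l, hl, hyl⟩ : ∃ l ∈ h.map (fun t => nchocChain (-t)), y ∈ l :=
    List.mem_flatten.mp hy
  obtain ⟨t, ht, rfl⟩ := List.mem_map.mp hl
  have h1 := (nchocChain_mem hyl).2
  have h2 := (List.min?_eq_some_iff.mp hmin).2 t ht
  omega

-- main loop lemma: A's loop accumulates the greedy top-n sum of the chain multiset
theorem aLoopA_top (n : Nat) : ∀ (h : List Int) (acc : Int), (∃ t ∈ h, t ≤ 0) →
    nchocLoopA n h acc = acc + nchocTop n (nchocE h) := by
  induction n with
  | zero => intro h acc _; simp [nchocLoopA, nchocTop]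
  | succ n ih =>
    intro h acc hex
    obtain ⟨t0, ht0, ht0le⟩ := hex
    have hne : h ≠ [] := List.ne_nil_of_mem ht0
    obtain ⟨m, hmin⟩ : ∃ m, h.min? = some m := by
      cases hm : h.min? with
      | none => exact absurd (List.min?_eq_none_iff.mp hm) hne
      | some m => exact ⟨m, rfl⟩
    have hmem : m ∈ h := (List.min?_eq_some_iff.mp hmin).1
    have hm0 : m ≤ 0 := le_trans ((List.min?_eq_some_iff.mp hmin).2 t0 ht0) ht0le
    by_cases hmz : m = 0
    · -- the maximal bag is 0: every pick eats 0, and the chain multiset is empty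
      subst hmz
      have hE : nchocE h = [] := by
        unfold nchocE
        rw [List.flatten_eq_nil_iff]
        intro l hl
        obtain ⟨t, ht, rfl⟩ := List.mem_map.mp hl
        have := (List.min?_eq_some_iff.mp hmin).2 t ht
        exact nchocChain_of_nonpos (by omega)
      rw [aLoopA_minzero (n + 1) h acc hmin, hE, nchocTop]
      simp
    · -- positive maximum bag v = -m
      have hv : 0 < -m := by omega
      have hlen : ¬ h.length = 0 := by simp [List.length_eq_zero_iff, hne]
      rw [nchocLoopA]
      simp only [hlen, if_false, hmin]
      have hfd0 : (0 : Int) ≤ PySem.Int.floordiv (-m) 2 :=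
        (PySem.Int.le_floordiv_iff_mul_le (by norm_num)).mpr (by omega)
      have hrec : nchocLoopA n (h.erase m ++ [-(PySem.Int.floordiv (-1 * m) 2)])
          (acc + PySem.Int.mod (-1 * m) nchocP)
          = acc + PySem.Int.mod (-1 * m) nchocP
            + nchocTop n (nchocE (h.erase m ++ [-(PySem.Int.floordiv (-1 * m) 2)])) := by
        apply ih
        refine ⟨-(PySem.Int.floordiv (-1 * m) 2), by simp, ?_⟩
        rw [neg_one_mul]
        omega
      rw [hrec]
      have hEnew : nchocE (h.erase m ++ [-(PySem.Int.floordiv (-1 * m) 2)])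
          = nchocE (h.erase m) ++ nchocChain (PySem.Int.floordiv (-m) 2) := by
        rw [nchocE_append, neg_one_mul, neg_neg]
      have hEold : (nchocE h).Perm
          (-m :: (nchocE (h.erase m) ++ nchocChain (PySem.Int.floordiv (-m) 2))) := by
        refine (nchocE_step h m hmem).trans ?_
        rw [nchocChain_of_pos hv]
        refine (List.Perm.cons _ ?_)
        exact List.perm_append_comm
      have htop : nchocTop (n + 1) (nchocE h)
          = PySem.Int.mod (-m) nchocP
            + nchocTop n (nchocE (h.erase m) ++ nchocChain (PySem.Int.floordiv (-m) 2)) := by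
        exact nchocTop_cons n _ _ (-m) hEold (nchocE_ub h m hmin)
      rw [hEnew, htop, neg_one_mul]
      ring

-- greedy top-n sum = sum of (· % p) over the first n of the descending sort
theorem nchocTop_sorted (n : Nat) : ∀ (l : List Int),
    nchocTop n l = (((PySem.List.sorted l (fun v => v) true).take n).map
      (fun v => PySem.Int.mod v nchocP)).sum := by
  induction n with
  | zero => intro l; simp [nchocTop]
  | succ n ih =>
    intro l
    rcases hl : PySem.List.sorted l (fun v => v) true with _ | ⟨m, t⟩
    · have hnil : l = [] := by
        have := PySem.List.sorted_perm (xs := l) (key := fun v : Int => v) (rev := true)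
        rw [hl] at this
        exact this.symm.eq_nil
      subst hnil
      simp [nchocTop]
    · have hperm : l.Perm (m :: t) := by
        have := PySem.List.sorted_perm (xs := l) (key := fun v : Int => v) (rev := true)
        rw [hl] at this
        exact this.symm
      have hub : ∀ y ∈ l, y ≤ m := by
        have := PySem.List.key_head_sorted_rev_ge (xs := l) (key := fun v : Int => v) hl
        simpa using this
      rw [nchocTop_cons n l t m hperm hub]
      have hpw : t.Pairwise (fun a b : Int => b ≤ a) := by
        have := PySem.List.sorted_pairwise_rev (xs := l) (key := fun v : Int => v)
        rw [hl] at this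
        exact (List.pairwise_cons.mp this).2
      have hts : PySem.List.sorted t (fun v => v) true = t :=
        PySem.List.sorted_rev_eq_self_of_pairwise _ _ hpw
      rw [ih t, hts]
      simp

theorem sum_map_mod (l : List Int) :
    PySem.Int.mod ((l.map (fun v => PySem.Int.mod v nchocP)).sum) nchocP
      = PySem.Int.mod l.sum nchocP := by
  have hp : (0 : Int) < nchocP := by norm_num [nchocP]
  have key : ∀ l : List Int,
      ((l.map (fun v => PySem.Int.mod v nchocP)).sum) % nchocP = l.sum % nchocP := by
    intro l
    induction l with
    | nil => rfl
    | cons x t iht =>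
      simp only [List.map_cons, List.sum_cons]
      rw [PySem.Int.mod_eq_emod_of_pos hp, Int.add_emod, Int.emod_emod_of_dvd _ dvd_rfl,
        iht, ← Int.add_emod]
  rw [PySem.Int.mod_eq_emod_of_pos hp, PySem.Int.mod_eq_emod_of_pos hp]
  exact key l

-- vals of B's port = the chain multiset of A's initial heap
theorem vals_eq_E (B : List Int) :
    B.foldl (fun acc x => acc ++ nchocChain x) [] = nchocE (B.map (fun x => -x)) := by
  rw [PySem.List.foldl_append_eq_flatMap]
  unfold nchocE
  rw [List.flatMap_def, List.map_map]
  simp [Function.comp_def]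

-- ===== VERDICT (by name: the statement is the Claim_ definition above) =====
theorem nchoc_spec : Claim_equal_nchoc := by
  unfold Claim_equal_nchoc
  intro A B _ hpre
  unfold Spec_nchoc nchoc nchoc_alt
  have h0 : PySem.Int.mod (0 : Int) nchocP = 0 := by decide
  by_cases hB : B = []
  · subst hB
    simp [PySem.List.len, PySem.List.sorted, h0]
  · have hlen : ¬ PySem.List.len B = 0 := by
      simp [PySem.List.len_eq, List.length_eq_zero_iff, hB]
    rw [if_neg hlen]
    by_cases hA : A ≤ 0
    · have htn : A.toNat = 0 := by omega
      rw [htn]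
      simp only [nchocLoopA, h0]
      split_ifs with hlv
      · have hnil : B.foldl (fun acc x => acc ++ nchocChain x) [] = [] := by
          rw [← List.length_eq_zero_iff]
          omega
        rw [hnil]
        decide
      · simp [h0]
    · have hx : ∃ x ∈ B, 0 ≤ x := by
        rcases hpre with h | h | h
        · exact absurd h hB
        · exact h
        · omega
      obtain ⟨x, hxB, hx0⟩ := hx
      have hex : ∃ t ∈ B.map (fun y => -y), t ≤ 0 :=
        ⟨-x, List.mem_map.mpr ⟨x, hxB, rfl⟩, by omega⟩
      rw [aLoopA_top A.toNat _ 0 hex, zero_add]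
      dsimp only
      rw [vals_eq_E B]
      split_ifs with hlv
      · rw [nchocTop_sorted A.toNat (nchocE (B.map (fun x => -x))),
          List.take_of_length_le (by rw [PySem.List.length_sorted]; omega), sum_map_mod,
          (PySem.List.sorted_perm (xs := nchocE (B.map (fun x => -x)))
            (key := fun v : Int => v) (rev := true)).sum_eq]
      · rw [nchocTop_sorted A.toNat (nchocE (B.map (fun x => -x))), sum_map_mod]
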